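-- pv_equiv track=rewrite | github.com/SaarD-creator/Planningsapp_version_3 | planningsalgoritme.py | partition_run_lengths
-- ===== SOURCE A (Python) =====
-- def partition_run_lengths(L):
--     """Flexibele blokken: prioritair 3 uur, dan 2,4,1 om shift te vullen."""
--     blocks = [3,2,4,1]
--     dp = [(10**9, [])]*(L+1)
--     dp[0] = (0, [])
--     for i in range(1, L+1):
--         best = (10**9, [])
--         for b in blocks:
--             if i-b < 0:
--                 continue
--             prev_ones, prev_blocks = dp[i-b]
--             new_blocks = prev_blocks + [b]
--             ones = prev_ones + (1 if b==1 else 0)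
--             if ones < best[0]:
--                 best = (ones, new_blocks)
--         dp[i] = best
--     return dp[L][1]
-- ===== SOURCE B (Python) =====
-- def partition_run_lengths(L):
--     """Flexibele blokken: prioritair 3 uur, dan 2,4,1 om shift te vullen."""
--     if L == 1:
--         return [1]
--     r = L % 3
--     if r == 0:
--         return [3] * (L // 3)
--     if r == 2:
--         return [2] + [3] * (L // 3)
--     return [2, 2] + [3] * ((L - 4) // 3)
-- ===== Notes on version B (the rewrite author's own statement) =====
-- stated objective: faster
-- what changed: Replaces the O(L^2) DP (which copies a growing block list at every index) with the closed form the DP provably converges to: [] / [1] / a [2] or [2,2] prefix chosen by L mod 3 followed by all 3s.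
import Mathlib
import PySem

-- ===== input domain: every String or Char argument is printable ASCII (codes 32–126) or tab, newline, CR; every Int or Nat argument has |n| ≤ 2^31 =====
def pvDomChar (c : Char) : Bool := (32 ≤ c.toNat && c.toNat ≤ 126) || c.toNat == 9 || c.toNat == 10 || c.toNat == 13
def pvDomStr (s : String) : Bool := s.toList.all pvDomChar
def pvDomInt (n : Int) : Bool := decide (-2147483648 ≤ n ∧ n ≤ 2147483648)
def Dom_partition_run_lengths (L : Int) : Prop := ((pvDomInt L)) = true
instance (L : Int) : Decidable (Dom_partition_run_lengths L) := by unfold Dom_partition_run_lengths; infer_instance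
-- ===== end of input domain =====

-- B replaces A's O(L^2) DP (it copies a growing block list at every index) by the closed form
-- the DP provably converges to: [1] / [2]/[2,2] prefix by L mod 3, then all 3s — simpler and faster.

-- ===== PORT A =====
-- inner loop over blocks = [3,2,4,1]; dp.getD (i-b) default: Python's dp is pre-filled with the
-- default (10^9,[]) and slots ≥ i are never read, so reading the grown list with that default is exact
def pvABest (dp : List (Int × List Int)) (i : Nat) : Int × List Int :=
  [3, 2, 4, 1].foldl (fun best b =>
    if i < b then best
    else
      let p := dp.getD (i - b) ((10 : Int) ^ 9, [])
      let ones := p.1 + (if b == 1 then (1 : Int) else 0)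
      if ones < best.1 then (ones, p.2 ++ [Int.ofNat b]) else best)
    ((10 : Int) ^ 9, [])

-- the dp loop: for i in range(1, L+1): dp[i] = best  (dp grows by one entry per i)
def pvALoop (n : Nat) : List (Int × List Int) :=
  (List.range' 1 n).foldl (fun dp i => dp ++ [pvABest dp i]) [((0 : Int), ([] : List Int))]

def partition_run_lengths (L : Int) : List Int :=
  ((pvALoop L.toNat).getD L.toNat ((10 : Int) ^ 9, [])).2

-- ===== PORT B =====
def partition_run_lengths_alt (L : Int) : List Int :=
  if L == 1 then [1]
  else if PySem.Int.mod L 3 == 0 then List.replicate (PySem.Int.floordiv L 3).toNat 3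
  else if PySem.Int.mod L 3 == 2 then [2] ++ List.replicate (PySem.Int.floordiv L 3).toNat 3
  else [2, 2] ++ List.replicate (PySem.Int.floordiv (L - 4) 3).toNat 3

-- ===== PRECONDITION & SPEC =====
-- Python A raises IndexError for L < 0 (dp is then an empty list and dp[L] is out of range)
def Pre_partition_run_lengths (L : Int) : Prop := 0 ≤ L
instance (L : Int) : Decidable (Pre_partition_run_lengths L) := by unfold Pre_partition_run_lengths; infer_instance
def pvWitness_partition_run_lengths : Int := (7)

def Spec_partition_run_lengths (L : Int) (out : List Int) : Prop := out = partition_run_lengths_alt L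
instance (L : Int) (out : List Int) : Decidable (Spec_partition_run_lengths L out) := by unfold Spec_partition_run_lengths; infer_instance

-- ===== CLAIM (what is proved, stated in full; the proofs are below) =====
def Claim_equal_partition_run_lengths : Prop := ∀ (L : Int), Dom_partition_run_lengths L → Pre_partition_run_lengths L → Spec_partition_run_lengths L (partition_run_lengths L)


-- ===== LEMMAS AND PROOFS =====

-- the closed form the DP converges to, as a function on Nat
def pvCf (n : Nat) : List Int :=
  if n = 1 then [1]
  else if n % 3 = 0 then List.replicate (n / 3) 3
  else if n % 3 = 2 then 2 :: List.replicate (n / 3) 3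
  else 2 :: 2 :: List.replicate ((n - 4) / 3) 3

-- the dp entry at index n: (number of 1-blocks, the block list)
def pvF (n : Nat) : Int × List Int := ((if n = 1 then 1 else 0), pvCf n)

theorem pvCf_step (i : Nat) (h : 5 ≤ i) : pvCf (i - 3) ++ [3] = pvCf i := by
  have h3 : i % 3 = (i - 3) % 3 := by omega
  have hr : i % 3 = 0 ∨ i % 3 = 1 ∨ i % 3 = 2 := by omega
  rcases hr with hr | hr | hr
  · simp only [pvCf, show i - 3 ≠ 1 by omega, if_false, ← h3, hr, if_true,
      show i ≠ 1 by omega]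
    rw [show i / 3 = (i - 3) / 3 + 1 by omega, List.replicate_succ']
  · simp only [pvCf, show i - 3 ≠ 1 by omega, if_false, ← h3, hr, show i ≠ 1 by omega,
      show ¬(1 = 0) by omega, show ¬(1 = 2) by omega, if_false, List.cons_append]
    rw [show (i - 4) / 3 = (i - 3 - 4) / 3 + 1 by omega, List.replicate_succ']
  · simp only [pvCf, show i - 3 ≠ 1 by omega, if_false, ← h3, hr, show i ≠ 1 by omega,
      show ¬(2 = 0) by omega, if_false, if_true, List.cons_append]
    rw [show i / 3 = (i - 3) / 3 + 1 by omega, List.replicate_succ']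

theorem pvF_getD (i j : Nat) (h : j < i) :
    ((List.range i).map pvF).getD j ((10 : Int) ^ 9, []) = pvF j := by
  rw [List.getD_eq_getElem?_getD]
  simp [h]

theorem pvABest_eq (i : Nat) (h : 1 ≤ i) : pvABest ((List.range i).map pvF) i = pvF i := by
  by_cases h5 : i ≤ 4
  · interval_cases i <;> decide
  · have h5 : 4 < i := by omega
    have e3 := pvF_getD i (i - 3) (by omega)
    have e2 := pvF_getD i (i - 2) (by omega)
    have e4 := pvF_getD i (i - 4) (by omega)
    have e1 := pvF_getD i (i - 1) (by omega)
    simp only [pvABest, List.foldl, e3, e2, e4, e1,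
      if_neg (show ¬ i < 3 by omega), if_neg (show ¬ i < 2 by omega),
      if_neg (show ¬ i < 4 by omega), if_neg (show ¬ i < 1 by omega)]
    simp only [pvF, if_neg (show i - 3 ≠ 1 by omega), if_neg (show i - 2 ≠ 1 by omega),
      if_neg (show i - 1 ≠ 1 by omega), if_neg (show i ≠ 1 by omega)]
    by_cases h14 : i - 4 = 1 <;>
      simp [h14] <;> exact pvCf_step i (by omega)

theorem pvALoop_eq (n : Nat) : pvALoop n = (List.range (n + 1)).map pvF := by
  induction n with
  | zero => decide
  | succ k ih =>
    have hr : List.range' 1 (k + 1) = List.range' 1 k ++ [k + 1] := by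
      simpa [Nat.add_comm 1 k] using List.range'_concat (s := 1) (n := k) (step := 1)
    rw [pvALoop, hr, List.foldl_append]
    show (pvALoop k) ++ [pvABest (pvALoop k) (k + 1)] = _
    rw [ih, pvABest_eq _ (by omega)]
    simp [List.range_succ]

theorem pvAlt_eq_cf (L : Int) (h : 0 ≤ L) : partition_run_lengths_alt L = pvCf L.toNat := by
  obtain ⟨n, rfl⟩ := Int.eq_ofNat_of_zero_le h
  by_cases h1 : n = 1
  · subst h1; decide
  · have hm : ∀ m : Nat, (Int.ofNat m).fmod 3 = Int.ofNat (m % 3) := by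
      intro m; cases m with
      | zero => rfl
      | succ k => simp [Int.fmod]
    have hdv : ∀ m : Nat, (Int.ofNat m).fdiv 3 = Int.ofNat (m / 3) := by
      intro m; cases m with
      | zero => rfl
      | succ k => simp [Int.fdiv]
    have hr : n % 3 = 0 ∨ n % 3 = 1 ∨ n % 3 = 2 := by omega
    simp only [partition_run_lengths_alt, PySem.Int.mod, PySem.Int.floordiv, pvCf,
      Int.toNat_natCast]
    rw [if_neg (by simp; omega), if_neg h1]
    rcases hr with hrr | hrr | hrr
    · rw [if_pos (by rw [show ((n : Int)) = Int.ofNat n from rfl, hm, hrr]; rfl),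
        if_pos hrr, show ((n : Int)) = Int.ofNat n from rfl, hdv]
      rfl
    · have h4 : 4 ≤ n := by omega
      rw [if_neg (by rw [show ((n : Int)) = Int.ofNat n from rfl, hm, hrr]; decide),
        if_neg (by rw [show ((n : Int)) = Int.ofNat n from rfl, hm, hrr]; decide),
        if_neg (by omega), if_neg (by omega),
        show ((n : Int) - 4) = Int.ofNat (n - 4) by simp [Int.ofNat_eq_natCast]; omega, hdv]
      rfl
    · rw [if_neg (by rw [show ((n : Int)) = Int.ofNat n from rfl, hm, hrr]; decide),
        if_pos (by rw [show ((n : Int)) = Int.ofNat n from rfl, hm, hrr]; rfl),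
        if_neg (by omega), if_pos hrr,
        show ((n : Int)) = Int.ofNat n from rfl, hdv]
      rfl

-- ===== VERDICT (by name: the statement is the Claim_ definition above) =====
theorem partition_run_lengths_spec : Claim_equal_partition_run_lengths := by
  intro L _ hPre
  unfold Spec_partition_run_lengths partition_run_lengths
  rw [pvALoop_eq, pvF_getD _ _ (by omega), pvAlt_eq_cf L hPre]
  rfl
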